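-- pv_equiv track=rewrite | github.com/ExelPixel/waxorganizer | textProcessor.py | removeSingleSymbol
-- ===== SOURCE A (Python) =====
-- def removeSingleSymbol(line):
--     newLine = ""
--     if len(line) > 1:
--         lastIndex = len(line)-1
--         for i in range(len(line)):
--             if i != 0: left = line[i-1]
--             elif i == 0: left = None
--             if i != lastIndex: right = line[i+1]
--             elif i == lastIndex: right = None
--
--             if left == " " and right == " ":
--                 continue
--             elif left == None and right == " ":
--                 continue
--             elif left == " " and right == None:
--                 continue
--             else:
--                 newLine += line[i]
--     else:
--         return line
--     return newLine
-- ===== SOURCE B (Python) =====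
-- def removeSingleSymbol(line):
--     if len(line) <= 1:
--         return line
--     # Token view: split on the space character. Every length-1 token is space-isolated, so it is
--     # dropped; a separating space survives unless both adjacent tokens are empty
--     # (i.e. it sits strictly inside a run of >= 3 spaces / at an all-space edge).
--     toks = line.split(' ')
--     out = toks[0] if len(toks[0]) != 1 else ''
--     for prev, cur in zip(toks, toks[1:]):
--         if prev or cur:
--             out += ' '
--         if len(cur) != 1:
--             out += cur
--     return out
-- ===== Notes on version B (the rewrite author's own statement) =====
-- stated objective: faster
-- what changed: A's per-index loop checking each character's two neighbours is replaced by a token-level algorithm: split the line on the space character, drop every length-1 token, and emit a separating space unless both adjacent tokens are empty.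
import Mathlib
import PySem

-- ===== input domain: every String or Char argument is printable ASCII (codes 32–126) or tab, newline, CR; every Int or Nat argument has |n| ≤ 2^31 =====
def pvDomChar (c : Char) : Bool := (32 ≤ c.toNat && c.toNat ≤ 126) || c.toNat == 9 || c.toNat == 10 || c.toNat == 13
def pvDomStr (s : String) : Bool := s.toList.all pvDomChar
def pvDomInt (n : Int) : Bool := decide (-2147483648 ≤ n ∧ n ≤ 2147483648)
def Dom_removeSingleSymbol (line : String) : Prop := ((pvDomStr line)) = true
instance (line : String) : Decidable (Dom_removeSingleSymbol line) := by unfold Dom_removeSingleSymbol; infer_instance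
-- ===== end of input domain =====

-- B replaces A's per-character neighbour-checking index loop by a token-level
-- algorithm: split on the space character, drop length-1 tokens, keep a separating space unless
-- both adjacent tokens are empty (objective: faster, measured; the per-character Python-level loop becomes a per-token one over C-level str.split pieces).

-- ===== PORT A =====
-- Literal port of A's index loop. `line[i-1]` / `line[i+1]` are ported as `getElem?`
-- (exact: the guards `i ≠ 0` / `i ≠ lastIndex` keep both indices in range, so Python
-- never raises there), `None` as `none`, the `+=` accumulation as a foldl over a List Char.
def removeSingleSymbol (line : String) : String :=
  let cs := line.toList
  if cs.length > 1 then
    let lastIndex := cs.length - 1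
    let newLine : List Char :=
      (List.range cs.length).foldl (fun acc i =>
        let left : Option Char := if i ≠ 0 then cs[i-1]? else none
        let right : Option Char := if i ≠ lastIndex then cs[i+1]? else none
        if left = some ' ' ∧ right = some ' ' then acc
        else if left = none ∧ right = some ' ' then acc
        else if left = some ' ' ∧ right = none then acc
        else acc ++ [cs.getD i ' ']) []
    String.ofList newLine
  else line

-- ===== PORT B =====
-- Port of Source B: split the line on ' ' (Python str.split(' ') = List.splitOn ' ' on
-- the char list, empty pieces kept), emit tokens of length ≠ 1, and between each
-- adjacent token pair emit a space unless both tokens are empty.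
def removeSingleSymbol_alt (line : String) : String :=
  if line.toList.length ≤ 1 then line
  else
    let toks : List (List Char) := List.splitOn ' ' line.toList
    let t0 := toks.headD []
    let out0 : List Char := if t0.length ≠ 1 then t0 else []
    String.ofList ((toks.zip (toks.drop 1)).foldl (fun out pc =>
      let out2 := if pc.1 ≠ [] ∨ pc.2 ≠ [] then out ++ [' '] else out
      if pc.2.length ≠ 1 then out2 ++ pc.2 else out2) out0)

-- ===== PRECONDITION & SPEC =====
def Spec_removeSingleSymbol (line : String) (out : String) : Prop := out = removeSingleSymbol_alt line
instance (line : String) (out : String) : Decidable (Spec_removeSingleSymbol line out) := by unfold Spec_removeSingleSymbol; infer_instance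

-- ===== CLAIM (what is proved, stated in full; the proofs are below) =====
def Claim_equal_removeSingleSymbol : Prop := ∀ (line : String), Dom_removeSingleSymbol line → Spec_removeSingleSymbol line (removeSingleSymbol line)

-- ===== LEMMAS AND PROOFS =====

-- Canonical recursive description of A: process cs with `p` the (padded) left
-- neighbour of the head; a char is dropped iff both padded neighbours are spaces.
def rssGo (p : Char) : List Char → List Char
  | [] => []
  | c :: rest =>
      if p = ' ' ∧ rest.head?.getD ' ' = ' ' then rssGo c rest else c :: rssGo c rest

-- padded neighbours as functions of the index
def rssPadL (p : Char) (cs : List Char) (i : Nat) : Char :=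
  if i = 0 then p else cs.getD (i-1) ' '
def rssPadR (cs : List Char) (i : Nat) : Char := (cs.drop (i+1)).head?.getD ' '

-- A's filter-map over indices equals rssGo.
theorem rssA_eq_go (cs : List Char) : ∀ (p : Char),
    (((List.range cs.length).filter
        (fun i => ¬ (rssPadL p cs i = ' ' ∧ rssPadR cs i = ' '))).map (fun i => cs.getD i ' '))
      = rssGo p cs := by
  induction cs with
  | nil => intro p; simp [rssGo]
  | cons c rest ih =>
    intro p
    rw [List.length_cons, List.range_succ_eq_map]
    rw [List.filter_cons]
    have hmapfilter :
        ((List.map Nat.succ (List.range rest.length)).filter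
            (fun i => ¬ (rssPadL p (c :: rest) i = ' ' ∧ rssPadR (c :: rest) i = ' '))).map
              (fun i => (c :: rest).getD i ' ')
          = ((List.range rest.length).filter
              (fun j => ¬ (rssPadL c rest j = ' ' ∧ rssPadR rest j = ' '))).map
                (fun j => rest.getD j ' ') := by
      rw [List.filter_map, List.map_map]
      congr 1
      apply List.filter_congr
      intro j _
      have hL : rssPadL p (c :: rest) (j+1) = rssPadL c rest j := by
        cases j with
        | zero => simp [rssPadL]
        | succ k => simp [rssPadL]
      have hR : rssPadR (c :: rest) (j+1) = rssPadR rest j := by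
        simp [rssPadR]
      simp only [Function.comp, hL, hR]
    by_cases h : p = ' ' ∧ rest.head?.getD ' ' = ' '
    · have hc : (decide ¬ (rssPadL p (c :: rest) 0 = ' ' ∧ rssPadR (c :: rest) 0 = ' ')) = false := by
        simp [rssPadL, rssPadR, h.1, h.2]
      simp only [hc, Bool.false_eq_true, if_false]
      simp only [rssGo, if_pos h]
      rw [hmapfilter, ih c]
    · have hc : (decide ¬ (rssPadL p (c :: rest) 0 = ' ' ∧ rssPadR (c :: rest) 0 = ' ')) = true := by
        simp only [rssPadL, rssPadR, List.drop_succ_cons, List.drop_zero, decide_eq_true_eq]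
        tauto
      simp only [hc, if_true]
      simp only [rssGo, if_neg h, List.map_cons]
      rw [hmapfilter, ih c]
      simp

-- the loop body of A's port equals the canonical conditional append, for indices in range
theorem rssA_body (cs : List Char) (hn : cs.length > 1) (acc : List Char) (i : Nat)
    (hi : i < cs.length) :
    (let left : Option Char := if i ≠ 0 then cs[i-1]? else none
     let right : Option Char := if i ≠ cs.length - 1 then cs[i+1]? else none
     if left = some ' ' ∧ right = some ' ' then acc
     else if left = none ∧ right = some ' ' then acc
     else if left = some ' ' ∧ right = none then acc
     else acc ++ [cs.getD i ' '])
    = if ¬ (rssPadL ' ' cs i = ' ' ∧ rssPadR cs i = ' ') then acc ++ [cs.getD i ' '] else acc := by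
  show (if (if i ≠ 0 then cs[i-1]? else none) = some ' '
            ∧ (if i ≠ cs.length - 1 then cs[i+1]? else none) = some ' ' then acc
     else if (if i ≠ 0 then cs[i-1]? else none) = none
            ∧ (if i ≠ cs.length - 1 then cs[i+1]? else none) = some ' ' then acc
     else if (if i ≠ 0 then cs[i-1]? else none) = some ' '
            ∧ (if i ≠ cs.length - 1 then cs[i+1]? else none) = none then acc
     else acc ++ [cs.getD i ' ']) = _
  by_cases h0 : i = 0
  · subst h0
    rw [if_neg (show ¬((0:Nat) ≠ 0) by simp),
        if_pos (show (0:Nat) ≠ cs.length - 1 by omega),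
        List.getElem?_eq_getElem (show 0+1 < cs.length by omega),
        show rssPadL ' ' cs 0 = ' ' from by simp [rssPadL],
        show rssPadR cs 0 = cs[1] from by
          simp [rssPadR, List.getElem?_eq_getElem (show 0+1 < cs.length by omega)]]
    by_cases hb : cs[1] = ' ' <;> split_ifs <;> simp_all
  · rw [if_pos h0,
        List.getElem?_eq_getElem (show i-1 < cs.length by omega),
        show rssPadL ' ' cs i = cs[i-1] from by
          simp [rssPadL, h0, List.getD_eq_getElem?_getD,
            List.getElem?_eq_getElem (show i-1 < cs.length by omega)]]
    by_cases hl : i = cs.length - 1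
    · rw [if_neg (show ¬(i ≠ cs.length - 1) by simpa using hl),
          show rssPadR cs i = ' ' from by
            simp [rssPadR, show cs.length ≤ i + 1 by omega]]
      by_cases ha : cs[i-1] = ' ' <;> split_ifs <;> simp_all
    · rw [if_pos hl,
          List.getElem?_eq_getElem (show i+1 < cs.length by omega),
          show rssPadR cs i = cs[i+1] from by
            simp [rssPadR, List.head?_drop, List.getElem?_eq_getElem (show i+1 < cs.length by omega)]]
      by_cases ha : cs[i-1] = ' ' <;> by_cases hb : cs[i+1] = ' ' <;> split_ifs <;> simp_all

-- A's port (for length > 1) computes rssGo ' ' cs.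
theorem rssA_eq (cs : List Char) (hn : cs.length > 1) :
    ((List.range cs.length).foldl (fun acc i =>
        let left : Option Char := if i ≠ 0 then cs[i-1]? else none
        let right : Option Char := if i ≠ cs.length - 1 then cs[i+1]? else none
        if left = some ' ' ∧ right = some ' ' then acc
        else if left = none ∧ right = some ' ' then acc
        else if left = some ' ' ∧ right = none then acc
        else acc ++ [cs.getD i ' ']) [])
      = rssGo ' ' cs := by
  refine Eq.trans (PySem.List.foldl_congr_mem _ _
    (fun acc i =>
      if ¬ (rssPadL ' ' cs i = ' ' ∧ rssPadR cs i = ' ')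
      then acc ++ [cs.getD i ' '] else acc) _
    (fun acc i hi => rssA_body cs hn acc i (List.mem_range.mp hi))) ?_
  rw [PySem.List.foldl_append_ite]
  rw [List.nil_append, rssA_eq_go]

-- ===== B side: token view =====

-- concatenate tokens with single-space separators (inverse of splitOn ' ')
def rssSepcat : List (List Char) → List Char
  | [] => []
  | [t] => t
  | t :: u :: rs => t ++ ' ' :: rssSepcat (u :: rs)

-- B's per-token output: drop length-1 tokens, gap unless both neighbours empty
def rssGo2 (prev : List Char) : List (List Char) → List Char
  | [] => []
  | u :: rs =>
      (if prev = [] ∧ u = [] then [] else [' ']) ++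
        (if u.length ≠ 1 then u else []) ++ rssGo2 u rs

-- splitOn ' ' tokens reassemble to the original string
theorem rssSepcat_splitOn (cs : List Char) : rssSepcat (List.splitOn ' ' cs) = cs := by
  induction cs with
  | nil => simp [List.splitOn, List.splitOnP_nil, rssSepcat]
  | cons c rest ih =>
    rw [List.splitOn, List.splitOnP_cons]
    obtain ⟨h, tl, hht⟩ := List.exists_cons_of_ne_nil
      (List.splitOnP_ne_nil (fun a => a == ' ') rest)
    by_cases hc : c = ' '
    · subst hc
      rw [if_pos (by simp)]
      rw [List.splitOn] at ih
      rw [hht] at ih ⊢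
      show rssSepcat ([] :: h :: tl) = _
      rw [show rssSepcat ([] :: h :: tl) = [] ++ ' ' :: rssSepcat (h :: tl) from rfl, ← ih]
      simp
    · rw [if_neg (by simpa using hc)]
      rw [List.splitOn] at ih
      rw [hht] at ih ⊢
      show rssSepcat ((c :: h) :: tl) = _
      have : rssSepcat ((c :: h) :: tl) = c :: rssSepcat (h :: tl) := by
        cases tl <;> simp [rssSepcat]
      rw [this, ← ih]

-- tokens of splitOn ' ' contain no space
theorem rssSplitOn_spacefree (cs : List Char) :
    ∀ t ∈ List.splitOn ' ' cs, ' ' ∉ t := by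
  induction cs with
  | nil => simp [List.splitOn, List.splitOnP_nil]
  | cons c rest ih =>
    rw [List.splitOn, List.splitOnP_cons]
    rw [List.splitOn] at ih
    obtain ⟨h, tl, hht⟩ := List.exists_cons_of_ne_nil
      (List.splitOnP_ne_nil (fun a => a == ' ') rest)
    by_cases hc : c = ' '
    · subst hc
      rw [if_pos (by simp)]
      intro t ht
      rcases List.mem_cons.mp ht with h1 | h2
      · subst h1; simp
      · exact ih t h2
    · rw [if_neg (by simpa using hc)]
      rw [hht] at ih ⊢
      intro t ht
      rcases List.mem_cons.mp (by simpa using ht) with h1 | h2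
      · subst h1
        intro hm
        rcases List.mem_cons.mp hm with h3 | h4
        · exact hc h3.symm
        · exact ih h (List.mem_cons_self) h4
      · exact ih t (List.mem_cons_of_mem _ h2)

-- pass one space-free token: length-1 tokens vanish, the rest is copied
theorem rssGo_mid (s : List Char) (u : List Char) : ∀ (p : Char), p ≠ ' ' → (∀ x ∈ u, x ≠ ' ') →
    rssGo p (u ++ s) = u ++ rssGo (u.getLastD p) s := by
  induction u with
  | nil => intro p _ _; simp [List.getLastD]
  | cons x xs ihx =>
    intro p hp hu
    have hx : x ≠ ' ' := hu x (by simp)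
    simp only [List.cons_append, rssGo]
    rw [if_neg (by simp [hp])]
    rw [ihx x hx (fun z hz => hu z (by simp [hz]))]
    simp only [List.cons.injEq, true_and, List.append_cancel_left_eq]
    congr 1
    cases xs <;> simp [List.getLastD]

theorem rssGo_token (t : List Char) (s : List Char)
    (hf : ' ' ∉ t) (hs : s.head?.getD ' ' = ' ') :
    rssGo ' ' (t ++ s) = (if t.length ≠ 1 then t else []) ++ rssGo (t.getLastD ' ') s := by
  match t with
  | [] => simp [List.getLastD]
  | [c] =>
    simp [rssGo, hs, List.getLastD]
  | c :: d :: ds =>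
    have hd : d ≠ ' ' := fun h => hf (by simp [h])
    have hc : c ≠ ' ' := fun h => hf (by simp [h])
    have hfree : ∀ x ∈ ds, x ≠ ' ' := fun x hx h => hf (by simp [h ▸ hx])
    simp only [List.cons_append]
    simp only [rssGo]
    rw [if_neg (by simp [hd]), if_neg (by simp [hc]),
        rssGo_mid s ds d hd hfree]
    simp only [List.getLastD_cons]
    have hlasteq : ds.getLastD d = (d :: ds).getLastD ' ' := by
      cases ds <;> simp [List.getLastD]
    rw [hlasteq]
    simp

-- head of a sepcat: a space iff the first token is empty
theorem rssSepcat_head (u : List Char) (rs : List (List Char)) (hf : ' ' ∉ u) :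
    ((rssSepcat (u :: rs)).head?.getD ' ' = ' ') ↔ u = [] := by
  cases u with
  | nil =>
    cases rs with
    | nil => simp [rssSepcat]
    | cons v vs => simp [rssSepcat]
  | cons x xs =>
    have hx : x ≠ ' ' := fun h => hf (by simp [h])
    constructor
    · intro h
      exfalso; apply hx
      cases rs <;> simpa [rssSepcat] using h
    · intro h; exact absurd h (by simp)

-- main token lemma: rssGo over the reassembled string = token-level output
theorem rssGo_sepcat : ∀ (rest : List (List Char)) (t : List Char),
    (' ' ∉ t) → (∀ u ∈ rest, ' ' ∉ u) →
    rssGo ' ' (rssSepcat (t :: rest)) = (if t.length ≠ 1 then t else []) ++ rssGo2 t rest := by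
  intro rest
  induction rest with
  | nil =>
    intro t hf _
    rw [show rssSepcat [t] = t from rfl, show rssGo2 t [] = [] from rfl,
        ← List.append_nil t]
    rw [rssGo_token t [] hf (by simp)]
    simp [rssGo]
  | cons u rs ih =>
    intro t hf hrest
    rw [show rssSepcat (t :: u :: rs) = t ++ ' ' :: rssSepcat (u :: rs) from rfl]
    rw [rssGo_token t (' ' :: rssSepcat (u :: rs)) hf (by simp)]
    congr 1
    have hu : ' ' ∉ u := hrest u (by simp)
    have hrs : ∀ v ∈ rs, ' ' ∉ v := fun v hv => hrest v (by simp [hv])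
    have hihs := ih u hu hrs
    have hlast : (t.getLastD ' ' = ' ') ↔ t = [] := by
      cases t with
      | nil => simp [List.getLastD]
      | cons x xs =>
        rw [List.getLastD_cons]
        constructor
        · intro h
          exact absurd (h ▸ List.getLastD_mem_cons) hf
        · intro h; exact absurd h (by simp)
    simp only [rssGo]
    by_cases hcond : t.getLastD ' ' = ' ' ∧ (rssSepcat (u :: rs)).head?.getD ' ' = ' '
    · rw [if_pos hcond, hihs]
      have ht0 : t = [] := hlast.mp hcond.1
      have hu0 : u = [] := (rssSepcat_head u rs hu).mp hcond.2
      subst ht0; subst hu0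
      simp [rssGo2]
    · rw [if_neg hcond, hihs]
      have hne : ¬ (t = [] ∧ u = []) := fun h =>
        hcond ⟨hlast.mpr h.1, (rssSepcat_head u rs hu).mpr h.2⟩
      simp only [rssGo2]
      rw [if_neg hne]
      simp

-- B's foldl over adjacent token pairs = rssGo2
theorem rssB_fold (rest : List (List Char)) : ∀ (prev : List Char) (acc : List Char),
    (((prev :: rest).zip rest).foldl (fun out pc =>
        let out2 := if pc.1 ≠ [] ∨ pc.2 ≠ [] then out ++ [' '] else out
        if pc.2.length ≠ 1 then out2 ++ pc.2 else out2) acc)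
      = acc ++ rssGo2 prev rest := by
  induction rest with
  | nil => intro prev acc; simp [rssGo2]
  | cons u rs ih =>
    intro prev acc
    rw [List.zip_cons_cons, List.foldl_cons, ih]
    simp only [rssGo2]
    by_cases hg : prev = [] ∧ u = [] <;> by_cases hl : u.length = 1
    · obtain ⟨h1, h2⟩ := hg
      subst h1; subst h2; simp at hl
    · obtain ⟨h1, h2⟩ := hg
      subst h1; subst h2
      simp
    · have hor : prev ≠ [] ∨ u ≠ [] := by tauto
      simp [hor, hg, hl]
    · have hor : prev ≠ [] ∨ u ≠ [] := by tauto
      simp [hor, hg, hl]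

-- ===== VERDICT (by name: the statement is the Claim_ definition above) =====
theorem removeSingleSymbol_spec : Claim_equal_removeSingleSymbol := by
  unfold Claim_equal_removeSingleSymbol Spec_removeSingleSymbol
  intro line _
  simp only [removeSingleSymbol, removeSingleSymbol_alt]
  by_cases hn : line.toList.length > 1
  · rw [if_pos hn, if_neg (by omega)]
    obtain ⟨t0, rest, htoks⟩ := List.exists_cons_of_ne_nil
      (show List.splitOn ' ' line.toList ≠ [] from List.splitOnP_ne_nil _ _)
    rw [rssA_eq line.toList hn, htoks]
    rw [show (t0 :: rest).headD [] = t0 from rfl,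
        show List.drop 1 (t0 :: rest) = rest from rfl]
    rw [rssB_fold rest t0]
    rw [← rssSepcat_splitOn line.toList, htoks]
    rw [rssGo_sepcat rest t0
      (rssSplitOn_spacefree line.toList t0 (htoks ▸ List.mem_cons_self))
      (fun u hu => rssSplitOn_spacefree line.toList u (htoks ▸ List.mem_cons_of_mem _ hu))]
  · rw [if_neg hn, if_pos (by omega)]
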